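-- pv_equiv track=rewrite | github.com/Kagawa19/repository-url | ai_services_api/services/search/indexing/index_creator.py | _has_expertise_match
-- ===== SOURCE A (Python) =====
-- from typing import List, Dict, Any, Optional
--
-- def _has_expertise_match(query: str, expertise_list: List[str]) -> bool:
--     """
--     Check if query terms match any expertise areas with a more lenient approach.
--
--     Args:
--         query (str): Search query
--         expertise_list (List[str]): List of expertise areas
--
--     Returns:
--         bool: True if there's a match, False otherwise
--     """
--     if not expertise_list:
--         return False
--
--     # Normalize query for comparison
--     query_lower = query.lower()
--     query_terms = set(term.lower() for term in query.split())
--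
--     for expertise in expertise_list:
--         if not expertise:
--             continue
--
--         expertise_lower = expertise.lower()
--
--         # Check for direct substring match first (most reliable)
--         if query_lower in expertise_lower or expertise_lower in query_lower:
--             return True
--
--         # Also check for individual term matches
--         expertise_terms = set(term.lower() for term in expertise.split())
--
--         # Check for any overlap between query terms and expertise terms
--         if query_terms.intersection(expertise_terms):
--             return True
--
--     return False
-- ===== SOURCE B (Python) =====
-- def _has_expertise_match(query, expertise_list):
--     """Check if query matches any expertise via one substring pass, then one
--     global term-set intersection against an index built up front."""
--     query_lower = query.lower()
--     lowered = [e.lower() for e in expertise_list if e]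
--     if any(query_lower in el or el in query_lower for el in lowered):
--         return True
--     query_terms = set(t.lower() for t in query.split())
--     all_terms = set()
--     for e in expertise_list:
--         if e:
--             all_terms.update(t.lower() for t in e.split())
--     return bool(query_terms & all_terms)
-- ===== Notes on version B (the rewrite author's own statement) =====
-- stated objective: alternative
-- what changed: A interleaves the substring test and a per-expertise term-set intersection inside one early-return loop; B decomposes the decision into a single substring pass over the lowered non-empty expertise strings followed by ONE intersection of the query's term set with a global index of all expertise terms built up front.
import Mathlib
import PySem

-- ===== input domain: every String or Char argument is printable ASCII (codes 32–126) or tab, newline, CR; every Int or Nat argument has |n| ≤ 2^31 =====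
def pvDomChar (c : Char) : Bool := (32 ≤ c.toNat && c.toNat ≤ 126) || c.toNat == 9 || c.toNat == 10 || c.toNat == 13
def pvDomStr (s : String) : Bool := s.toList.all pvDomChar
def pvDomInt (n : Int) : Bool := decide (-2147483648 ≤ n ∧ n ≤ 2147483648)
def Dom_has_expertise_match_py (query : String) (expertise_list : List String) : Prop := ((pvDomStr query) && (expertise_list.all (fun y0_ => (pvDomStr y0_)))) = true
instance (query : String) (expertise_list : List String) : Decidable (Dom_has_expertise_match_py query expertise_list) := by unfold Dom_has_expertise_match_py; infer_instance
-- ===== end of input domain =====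

-- B replaces A's interleaved per-expertise checks by one substring pass plus a single
-- intersection against a global term index built up front (objective: alternative).

-- ===== PORT A =====
-- the lowercased term set of a string, as A builds it: set(term.lower() for term in s.split())
def hemTerms (s : String) : PySem.Set String :=
  PySem.Set.ofList ((PySem.Str.split₀ s).map PySem.Str.lower)

-- A's for-loop (early return = Bool result)
def hemLoopA (query_lower : String) (query_terms : PySem.Set String) : List String → Bool
  | [] => false
  | e :: rest =>
    if e = "" then hemLoopA query_lower query_terms rest
    else
      let expertise_lower := PySem.Str.lower e
      if PySem.Str.isIn query_lower expertise_lower || PySem.Str.isIn expertise_lower query_lower then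
        true
      else
        if !(PySem.Set.inter query_terms (hemTerms e)).isEmpty then true
        else hemLoopA query_lower query_terms rest

def has_expertise_match_py (query : String) (expertise_list : List String) : Bool :=
  if expertise_list.isEmpty then false
  else
    let query_lower := PySem.Str.lower query
    let query_terms := hemTerms query
    hemLoopA query_lower query_terms expertise_list

-- ===== PORT B =====
-- global index: union of the lowercased term sets of all non-empty expertise strings
def hemAllTerms (expertise_list : List String) : PySem.Set String :=
  expertise_list.foldl
    (fun acc e =>
      if e = "" then acc
      else PySem.Set.update acc ((PySem.Str.split₀ e).map PySem.Str.lower))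
    PySem.Set.empty

def has_expertise_match_py_alt (query : String) (expertise_list : List String) : Bool :=
  let query_lower := PySem.Str.lower query
  let lowered := (expertise_list.filter (fun e => e ≠ "")).map PySem.Str.lower
  if lowered.any (fun el => PySem.Str.isIn query_lower el || PySem.Str.isIn el query_lower) then
    true
  else
    let query_terms : PySem.Set String :=
      PySem.Set.ofList ((PySem.Str.split₀ query).map PySem.Str.lower)
    !(PySem.Set.inter query_terms (hemAllTerms expertise_list)).isEmpty

-- ===== PRECONDITION & SPEC =====
def Spec_has_expertise_match_py (query : String) (expertise_list : List String) (out : Bool) : Prop := out = has_expertise_match_py_alt query expertise_list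
instance (query : String) (expertise_list : List String) (out : Bool) : Decidable (Spec_has_expertise_match_py query expertise_list out) := by unfold Spec_has_expertise_match_py; infer_instance

-- ===== CLAIM (what is proved, stated in full; the proofs are below) =====
def Claim_equal_has_expertise_match_py : Prop := ∀ (query : String) (expertise_list : List String), Dom_has_expertise_match_py query expertise_list → Spec_has_expertise_match_py query expertise_list (has_expertise_match_py query expertise_list)

-- ===== LEMMAS AND PROOFS =====

-- A's loop is the disjunction, over the list, of the per-element test
theorem hemLoopA_eq_any (ql : String) (qt : PySem.Set String) (l : List String) :
    hemLoopA ql qt l =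
      l.any (fun e => decide (e ≠ "") &&
        ((PySem.Str.isIn ql (PySem.Str.lower e) || PySem.Str.isIn (PySem.Str.lower e) ql) ||
          !(PySem.Set.inter qt (hemTerms e)).isEmpty)) := by
  induction l with
  | nil => rfl
  | cons e rest ih =>
    simp only [hemLoopA, List.any_cons]
    by_cases he : e = ""
    · simp [he, ih]
    · rw [ih]
      cases hs : (PySem.Str.isIn ql (PySem.Str.lower e) || PySem.Str.isIn (PySem.Str.lower e) ql) <;>
        cases ht : (!(PySem.Set.inter qt (hemTerms e)).isEmpty) <;>
          simp [he]

-- A's empty-list guard is redundant: the loop already returns false on []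
theorem hemA_eq_loop (query : String) (l : List String) :
    has_expertise_match_py query l = hemLoopA (PySem.Str.lower query) (hemTerms query) l := by
  cases l <;> rfl

-- B's if-then-else as a disjunction
theorem hemB_eq_or (query : String) (l : List String) :
    has_expertise_match_py_alt query l =
      (((l.filter (fun e => e ≠ "")).map PySem.Str.lower).any
          (fun el => PySem.Str.isIn (PySem.Str.lower query) el ||
            PySem.Str.isIn el (PySem.Str.lower query)) ||
        !(PySem.Set.inter (hemTerms query) (hemAllTerms l)).isEmpty) := by
  cases h : ((l.filter (fun e => e ≠ "")).map PySem.Str.lower).any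
      (fun el => PySem.Str.isIn (PySem.Str.lower query) el ||
        PySem.Str.isIn el (PySem.Str.lower query)) <;>
  · simp only [has_expertise_match_py_alt]
    rw [h]
    simp [hemTerms]

-- membership in B's global index
theorem mem_hemAllTerms (l : List String) (t : String) :
    t ∈ hemAllTerms l ↔ ∃ e ∈ l, e ≠ "" ∧ t ∈ (PySem.Str.split₀ e).map PySem.Str.lower := by
  have key : ∀ (acc : PySem.Set String),
      (t ∈ l.foldl (fun acc e => if e = "" then acc
          else PySem.Set.update acc ((PySem.Str.split₀ e).map PySem.Str.lower)) acc) ↔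
        t ∈ acc ∨ ∃ e ∈ l, e ≠ "" ∧ t ∈ (PySem.Str.split₀ e).map PySem.Str.lower := by
    induction l with
    | nil => simp
    | cons e rest ih =>
      intro acc
      by_cases he : e = ""
      · simp [he, List.foldl_cons, ih]
      · simp only [List.foldl_cons, if_neg he, ih, PySem.Set.mem_update]
        constructor
        · rintro (⟨h | h⟩ | ⟨e', h1, h2, h3⟩)
          · exact Or.inl h
          · exact Or.inr ⟨e, List.mem_cons_self, he, h⟩
          · exact Or.inr ⟨e', List.mem_cons_of_mem _ h1, h2, h3⟩
        · rintro (h | ⟨e', h1, h2, h3⟩)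
          · exact Or.inl (Or.inl h)
          · rcases List.mem_cons.mp h1 with rfl | h1'
            · exact Or.inl (Or.inr h3)
            · exact Or.inr ⟨e', h1', h2, h3⟩
  simpa [hemAllTerms] using key PySem.Set.empty

-- emptiness of a set intersection as existence of a common element
theorem inter_not_isEmpty_iff (s t : PySem.Set String) :
    (!(PySem.Set.inter s t).isEmpty) = true ↔ ∃ x, x ∈ s ∧ x ∈ t := by
  rw [Bool.not_eq_eq_eq_not, Bool.not_true, List.isEmpty_eq_false_iff_exists_mem]
  constructor
  · rintro ⟨x, hx⟩; exact ⟨x, (PySem.Set.mem_inter s t x).mp hx⟩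
  · rintro ⟨x, hx⟩; exact ⟨x, (PySem.Set.mem_inter s t x).mpr hx⟩

-- ===== VERDICT (by name: the statement is the Claim_ definition above) =====
theorem has_expertise_match_py_spec : Claim_equal_has_expertise_match_py := by
  intro query l _
  unfold Spec_has_expertise_match_py
  rw [hemA_eq_loop, hemLoopA_eq_any, hemB_eq_or, Bool.eq_iff_iff]
  simp only [List.any_map, List.any_filter, List.any_eq_true, Function.comp_apply,
    Bool.and_eq_true, Bool.or_eq_true, decide_eq_true_eq, inter_not_isEmpty_iff,
    mem_hemAllTerms, hemTerms, PySem.Set.mem_ofList]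
  constructor
  · rintro ⟨e, he, hne, (hsub | ⟨t, ht, hmem⟩)⟩
    · exact Or.inl ⟨e, he, hne, hsub⟩
    · exact Or.inr ⟨t, ht, e, he, hne, hmem⟩
  · rintro (⟨e, he, hne, hsub⟩ | ⟨t, ht, e, he, hne, hmem⟩)
    · exact ⟨e, he, hne, Or.inl hsub⟩
    · exact ⟨e, he, hne, Or.inr ⟨t, ht, hmem⟩⟩
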